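-- pv_equiv track=rewrite | github.com/SidJain1412/CompetitiveProgramming | Strings/AmazingSubarrays.py | solve
-- ===== SOURCE A (Python) =====
-- def solve(A):
--     count = 0
--     size = len(A)
--     A = A.lower()
--     vowels = ['a', 'e', 'i', 'o', 'u']
--     for i in range(size):
--         if A[i] in vowels:
--             # No need to run permutations
--             count += size - i
--
--     return count % 10003
-- ===== SOURCE B (Python) =====
-- def solve(A):
--     # Prefix-count accumulation: total = sum over positions of vowels seen so far.
--     count = 0
--     vowels_so_far = 0
--     for ch in A.lower():
--         if ch in "aeiou":
--             vowels_so_far += 1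
--         count += vowels_so_far
--     return count % 10003
-- ===== Notes on version B (the rewrite author's own statement) =====
-- stated objective: alternative
-- what changed: Instead of adding the remaining length at each vowel position, B maintains a running prefix vowel counter and adds it unconditionally at every position, iterating over characters directly rather than indexing by range; the constant-factor speedup comes from dropping per-iteration indexing.
import Mathlib
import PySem

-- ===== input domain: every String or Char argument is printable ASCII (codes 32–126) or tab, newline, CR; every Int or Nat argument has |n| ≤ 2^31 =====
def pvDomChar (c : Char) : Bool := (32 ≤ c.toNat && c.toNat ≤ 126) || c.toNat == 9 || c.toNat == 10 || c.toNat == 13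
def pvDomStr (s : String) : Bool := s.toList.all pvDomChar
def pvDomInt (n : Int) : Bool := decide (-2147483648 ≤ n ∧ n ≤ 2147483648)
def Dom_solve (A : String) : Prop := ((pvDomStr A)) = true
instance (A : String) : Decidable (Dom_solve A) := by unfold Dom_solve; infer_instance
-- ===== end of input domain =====

-- B replaces A's conditional 'count += size - i' at vowel positions by a running prefix
-- vowel counter added unconditionally at every position (same O(n) cost, different invariant).

-- ===== PORT A =====
-- A[i] is indexed through the lowered string's character list (i is always in range here, so exact).
def solve (A : String) : Int :=
  let count : Int := 0
  let size : Int := PySem.Str.len A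
  let Al : List Char := (PySem.Str.lower A).toList
  let vowels : List Char := ['a', 'e', 'i', 'o', 'u']
  let count := (PySem.List.pyRange 0 size 1).foldl
    (fun count i =>
      if vowels.contains (PySem.List.pyGetD Al i ' ') then count + (size - i) else count)
    count
  PySem.Int.mod count 10003

-- ===== PORT B =====
-- 'ch in "aeiou"' for a single character ch is exactly character membership in the string's characters.
def solve_alt (A : String) : Int :=
  let st := ((PySem.Str.lower A).toList).foldl
    (fun (st : Int × Int) ch =>
      let v := if ("aeiou".toList).contains ch then st.1 + 1 else st.1
      (v, st.2 + v))
    ((0 : Int), (0 : Int))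
  PySem.Int.mod st.2 10003

-- ===== PRECONDITION & SPEC =====
def Spec_solve (A : String) (out : Int) : Prop := out = solve_alt A
instance (A : String) (out : Int) : Decidable (Spec_solve A out) := by unfold Spec_solve; infer_instance

-- ===== CLAIM (what is proved, stated in full; the proofs are below) =====
def Claim_equal_solve : Prop := ∀ (A : String), Dom_solve A → Spec_solve A (solve A)

-- ===== LEMMAS AND PROOFS =====

def pvVowel (c : Char) : Bool := (['a', 'e', 'i', 'o', 'u'] : List Char).contains c

-- the common value: weighted vowel sum, S (c :: cs) = [c vowel]·(|cs|+1) + S cs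
def pvS : List Char → Int
  | [] => 0
  | c :: cs => (if pvVowel c then (cs.length : Int) + 1 else 0) + pvS cs

theorem pvVowel_eq_aeiou (c : Char) : ("aeiou".toList).contains c = pvVowel c := rfl

theorem pvA_loop (suf : List Char) (full pre : List Char) (acc : Int)
    (h : full = pre ++ suf) :
    (PySem.List.pyRange (pre.length : Int) ((full.length : Int)) 1).foldl
      (fun c i =>
        if (['a', 'e', 'i', 'o', 'u'] : List Char).contains (PySem.List.pyGetD full i ' ')
        then c + ((full.length : Int) - i) else c) acc
    = acc + pvS suf := by
  induction suf generalizing pre acc with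
  | nil =>
    subst h
    rw [PySem.List.pyRange_one_eq_nil (by simp)]
    simp [pvS]
  | cons c cs ih =>
    have hlen : full.length = pre.length + cs.length + 1 := by
      subst h; simp; omega
    have hlt : (pre.length : Int) < (full.length : Int) := by
      rw [hlen]; push_cast; omega
    rw [PySem.List.pyRange_one_cons hlt]
    simp only [List.foldl_cons]
    have hget : PySem.List.pyGetD full (pre.length : Int) ' ' = c := by
      rw [PySem.List.pyGetD_eq_getElem full ' ' (by positivity) (by rw [hlen]; push_cast; omega)]
      subst h
      simp [List.getElem_append_right (Nat.le_refl pre.length)]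
    rw [hget]
    have hpre : ((pre.length : Int) + 1) = (((pre ++ [c]).length : Nat) : Int) := by
      simp
    rw [hpre, ih (pre ++ [c]) _ (by simpa using h)]
    simp only [pvS, pvVowel, hlen]
    split <;> push_cast <;> ring

theorem pvB_loop (l : List Char) (v c : Int) :
    (l.foldl
      (fun (st : Int × Int) ch =>
        let v' := if ("aeiou".toList).contains ch then st.1 + 1 else st.1
        (v', st.2 + v'))
      (v, c)).2 = c + v * (l.length : Int) + pvS l := by
  induction l generalizing v c with
  | nil => simp [pvS]
  | cons x xs ih =>
    simp only [List.foldl_cons, pvVowel_eq_aeiou, pvS] at ih ⊢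
    rw [ih]
    by_cases hx : pvVowel x = true <;> simp [hx] <;> ring

theorem pvLen (A : String) :
    PySem.Str.len A = (((PySem.Str.lower A).toList.length : Nat) : Int) := by
  simp [PySem.Str.len_eq, PySem.Chars.lower]

-- ===== VERDICT (by name: the statement is the Claim_ definition above) =====
theorem solve_spec : Claim_equal_solve := by
  intro A _
  unfold Spec_solve solve solve_alt
  simp only []
  set Al := (PySem.Str.lower A).toList with hAl
  rw [pvLen A, ← hAl]
  have hA := pvA_loop Al Al [] 0 rfl
  simp only [List.length_nil, Nat.cast_zero] at hA
  rw [hA, pvB_loop Al 0 0]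
  ring_nf
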